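-- pv_equiv track=rewrite | github.com/gschlabitz/rinno-train | main.py | count_program_completions
-- ===== SOURCE A (Python) =====
-- def has_completed_training_program(program_name, completion_records):
--     '''
--     Returns True if specified program is found within the completion records.
--
--     Parameters:
--         completion_records (list): list of completions in the
--         form of: {'name': 'training program name (string)', ...}
--
--     Returns:
--         True: program was found
--         False: program was not found
--     '''
--     for completion in completion_records:
--         if completion.get('name') == program_name:
--             return True
--     return False
--
-- def count_program_completions(training_programs, training_records):
--     '''
--     Given a list of training program names, count how many employees have
--     completed the training program at least once.
--
--     Parameters:
--         training_programs (list): list of training program names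
--         training_records (list): list of training records in the
--         form of: {
--             'name': 'employee (string)',
--             'completions': [
--                 {'name': 'training program name (string)'}
--             ]
--         }
--
--     Returns:
--         dict: index of training program names and the number of employees
--         who have completed it
--     '''
--     totals = {}
--     for program in training_programs:
--         totals[program] = 0
--         for record in training_records:
--             if has_completed_training_program(
--                 program,
--                 record.get('completions', [])
--             ):
--                 totals[program] += 1
--     return totals
-- ===== SOURCE B (Python) =====
-- def _completed_names(record):
--     # set of program names this employee has completed at least once
--     names = set()
--     for completion in record.get('completions', []):
--         n = completion.get('name')
--         if n is not None:
--             names.add(n)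
--     return names
--
-- def count_program_completions(training_programs, training_records):
--     # single pass over the records: build a completion-count index,
--     # then project it onto the requested programs
--     counts = {}
--     for record in training_records:
--         for n in _completed_names(record):
--             counts[n] = counts.get(n, 0) + 1
--     return {program: counts.get(program, 0) for program in training_programs}
-- ===== Notes on version B (the rewrite author's own statement) =====
-- stated objective: faster
-- what changed: Replaced the program-outer/record-inner nested scan by one record-outer pass that builds a per-program completion-count index (deduping names per record with a set), then projects that index onto the requested program list.
import Mathlib
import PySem

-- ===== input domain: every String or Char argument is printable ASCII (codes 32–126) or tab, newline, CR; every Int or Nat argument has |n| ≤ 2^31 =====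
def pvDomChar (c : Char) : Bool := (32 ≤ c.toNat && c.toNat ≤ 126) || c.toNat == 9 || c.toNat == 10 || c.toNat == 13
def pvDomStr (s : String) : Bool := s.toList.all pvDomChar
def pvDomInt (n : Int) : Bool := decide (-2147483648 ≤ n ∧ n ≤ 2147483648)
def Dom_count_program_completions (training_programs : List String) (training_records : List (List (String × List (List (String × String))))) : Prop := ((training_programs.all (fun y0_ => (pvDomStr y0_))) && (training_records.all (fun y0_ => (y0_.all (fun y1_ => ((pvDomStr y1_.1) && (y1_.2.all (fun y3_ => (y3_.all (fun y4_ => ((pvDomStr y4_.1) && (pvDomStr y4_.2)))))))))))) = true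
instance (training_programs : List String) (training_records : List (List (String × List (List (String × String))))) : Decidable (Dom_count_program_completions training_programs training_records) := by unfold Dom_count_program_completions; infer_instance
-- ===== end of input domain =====

-- B replaces A's program-outer/record-inner nested scan by one pass over the records building a
-- completion-count index, then projects it onto the requested programs (objective: faster).

-- ===== PORT A =====
def has_completed_training_program (program_name : String) (completion_records : List (List (String × String))) : Bool :=
  match completion_records with
  | [] => false
  | completion :: rest =>
    if (PySem.Dict.mk completion).get? "name" = some program_name then true
    else has_completed_training_program program_name rest

def count_program_completions (training_programs : List String) (training_records : List (List (String × List (List (String × String))))) : List (String × Int) :=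
  (training_programs.foldl (fun totals program =>
      training_records.foldl (fun totals record =>
          if has_completed_training_program program ((PySem.Dict.mk record).getD "completions" []) then
            totals.modify program 0 (· + 1)
          else totals)
        (totals.insert program 0))
    PySem.Dict.empty).items

-- ===== PORT B =====
-- helper _completed_names of Source B: the set of completed program names of one record
def pvCompletedNames (record : List (String × List (List (String × String)))) : PySem.Set String :=
  ((PySem.Dict.mk record).getD "completions" []).foldl (fun names completion =>
    match (PySem.Dict.mk completion).get? "name" with
    | some n => PySem.Set.add names n
    | none => names) PySem.Set.empty

def count_program_completions_alt (training_programs : List String) (training_records : List (List (String × List (List (String × String))))) : List (String × Int) :=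
  let counts : PySem.Dict String Int := training_records.foldl (fun counts record =>
      (pvCompletedNames record).foldl (fun c n => c.modify n 0 (· + 1)) counts)
    PySem.Dict.empty
  (training_programs.foldl (fun out program => out.insert program (counts.getD program 0)) PySem.Dict.empty).items

-- ===== PRECONDITION & SPEC =====
def Spec_count_program_completions (training_programs : List String) (training_records : List (List (String × List (List (String × String))))) (out : List (String × Int)) : Prop := out = count_program_completions_alt training_programs training_records
instance (training_programs : List String) (training_records : List (List (String × List (List (String × String))))) (out : List (String × Int)) : Decidable (Spec_count_program_completions training_programs training_records out) := by unfold Spec_count_program_completions; infer_instance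

-- ===== CLAIM (what is proved, stated in full; the proofs are below) =====
def Claim_equal_count_program_completions : Prop := ∀ (training_programs : List String) (training_records : List (List (String × List (List (String × String))))), Dom_count_program_completions training_programs training_records → Spec_count_program_completions training_programs training_records (count_program_completions training_programs training_records)

-- ===== LEMMAS AND PROOFS =====

theorem pv_names_nodup_aux (l : List (List (String × String))) (s : PySem.Set String) (hs : s.Nodup) :
    (l.foldl (fun names completion =>
      match (PySem.Dict.mk completion).get? "name" with
      | some n => PySem.Set.add names n
      | none => names) s).Nodup := by
  induction l generalizing s with
  | nil => exact hs
  | cons c rest ih =>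
    cases h : (PySem.Dict.mk c).get? "name" with
    | none => simp only [List.foldl_cons, h]; exact ih _ hs
    | some n => simp only [List.foldl_cons, h]; exact ih _ (PySem.Set.nodup_add s n hs)

theorem pv_mem_names_aux (p : String) (l : List (List (String × String))) (s : PySem.Set String) :
    p ∈ l.foldl (fun names completion =>
      match (PySem.Dict.mk completion).get? "name" with
      | some n => PySem.Set.add names n
      | none => names) s ↔ p ∈ s ∨ has_completed_training_program p l = true := by
  induction l generalizing s with
  | nil => simp [has_completed_training_program]
  | cons c rest ih =>
    cases h : (PySem.Dict.mk c).get? "name" with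
    | none =>
      simp only [List.foldl_cons, h, has_completed_training_program]
      rw [ih]
      simp
    | some n =>
      simp only [List.foldl_cons, h, has_completed_training_program]
      rw [ih]
      simp only [PySem.Set.mem_add]
      by_cases hnp : n = p
      · subst hnp; simp
      · have hcond : ¬ ((some n : Option String) = some p) := by simpa using hnp
        rw [if_neg hcond]
        have hpn : ¬ p = n := fun e => hnp e.symm
        tauto

-- A's inner loop over the records, started from totals[program] = v
theorem pv_inner_A (p : String) (trs : List (List (String × List (List (String × String)))))
    (t : PySem.Dict String Int) (v : Int) :
    trs.foldl (fun t r =>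
        if has_completed_training_program p ((PySem.Dict.mk r).getD "completions" []) then
          t.modify p 0 (· + 1)
        else t) (t.insert p v)
      = t.insert p (v + (trs.countP (fun r => has_completed_training_program p ((PySem.Dict.mk r).getD "completions" []))) ) := by
  induction trs generalizing v with
  | nil => simp
  | cons r rest ih =>
    simp only [List.foldl_cons, List.countP_cons]
    by_cases h : has_completed_training_program p ((PySem.Dict.mk r).getD "completions" []) = true
    · rw [if_pos h]
      have hstep : (t.insert p v).modify p 0 (· + 1) = t.insert p (v + 1) := by
        simp [PySem.Dict.modify, PySem.Dict.getD_insert_self, PySem.Dict.insert_insert_self]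
      rw [hstep, ih]
      simp only [h]
      congr 1
      push_cast
      ring
    · rw [if_neg h, ih]
      simp [h]

theorem pv_names_nodup (r : List (String × List (List (String × String)))) : (pvCompletedNames r).Nodup :=
  pv_names_nodup_aux _ _ List.nodup_nil

theorem pv_mem_names (p : String) (r : List (String × List (List (String × String)))) :
    p ∈ pvCompletedNames r ↔ has_completed_training_program p ((PySem.Dict.mk r).getD "completions" []) = true := by
  unfold pvCompletedNames
  rw [pv_mem_names_aux]
  simp [PySem.Set.empty]

-- B's counter: the count indexed at p
theorem pv_counter_B (trs : List (List (String × List (List (String × String)))))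
    (d : PySem.Dict String Int) (p : String) :
    (trs.foldl (fun counts r => (pvCompletedNames r).foldl (fun c n => c.modify n 0 (· + 1)) counts) d).getD p 0
      = d.getD p 0 + trs.countP (fun r => decide (p ∈ pvCompletedNames r)) := by
  induction trs generalizing d with
  | nil => simp
  | cons r rest ih =>
    simp only [List.foldl_cons, List.countP_cons]
    rw [ih, PySem.Dict.getD_foldl_modify_add_one]
    by_cases h : p ∈ pvCompletedNames r
    · rw [List.count_eq_one_of_mem (pv_names_nodup r) h]
      simp only [h, decide_true]
      push_cast
      ring
    · rw [List.count_eq_zero_of_not_mem h]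
      simp [h]

-- ===== VERDICT (by name: the statement is the Claim_ definition above) =====
theorem count_program_completions_spec : Claim_equal_count_program_completions := by
  intro tps trs _
  unfold Spec_count_program_completions count_program_completions count_program_completions_alt
  congr 1
  apply PySem.List.foldl_congr_mem
  intro acc p _
  rw [pv_inner_A, pv_counter_B]
  congr 1
  rw [PySem.Dict.getD_empty]
  simp only [zero_add]
  congr 1
  apply List.countP_congr
  intro r _
  simp [pv_mem_names]
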